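-- pv_equiv track=rewrite | github.com/horimpark/code-playground | codewars/6kyu/N-centered Array.py | is_centered
-- ===== SOURCE A (Python) =====
-- def is_centered(xs: list[int], n: int) -> bool:
--     for x in range(0, int(len(xs)/2)+1):
--         summ = sum(xs[x:-x])
--         if x == 0:
--             summ = sum(xs)
--         elif x == len(xs) and len(xs) % 2 != 0:
--             summ = xs[x]
--         if summ == n:
--             return True
--     return False
-- ===== SOURCE B (Python) =====
-- def is_centered(xs: list[int], n: int) -> bool:
--     # One pass: start from the total and peel one symmetric pair per step (O(len(xs)) total).
--     s = sum(xs)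
--     for x in range(len(xs) // 2):
--         if s == n:
--             return True
--         s -= xs[x] + xs[-1 - x]
--     return s == n
-- ===== Notes on version B (the rewrite author's own statement) =====
-- stated objective: faster
-- what changed: Instead of re-summing each centered slice xs[x:-x] from scratch, B computes the total once and peels one symmetric pair per step, keeping a running window sum.
import Mathlib
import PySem

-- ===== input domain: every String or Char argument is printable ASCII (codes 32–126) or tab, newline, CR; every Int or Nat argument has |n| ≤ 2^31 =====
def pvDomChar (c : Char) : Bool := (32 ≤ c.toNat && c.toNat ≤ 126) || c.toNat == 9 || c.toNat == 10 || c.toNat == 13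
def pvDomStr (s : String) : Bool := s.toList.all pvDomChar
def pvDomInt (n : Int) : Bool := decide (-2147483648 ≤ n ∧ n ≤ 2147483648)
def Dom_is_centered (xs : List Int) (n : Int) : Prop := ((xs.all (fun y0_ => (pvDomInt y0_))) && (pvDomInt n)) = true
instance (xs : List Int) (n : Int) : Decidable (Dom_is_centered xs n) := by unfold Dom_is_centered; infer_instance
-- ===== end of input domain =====

-- B replaces A's per-window re-summation by one running sum that peels one symmetric pair per step.

-- ===== PORT A =====
-- the value A's loop body assigns to summ for the current x
def is_centered_summ (xs : List Int) (x : Int) : Int :=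
  let summ := (PySem.List.slice xs (some x) (some (-x))).sum   -- summ = sum(xs[x:-x])
  if x == 0 then xs.sum                                        -- if x == 0: summ = sum(xs)
  else if x == (xs.length : Int) && !(PySem.Int.mod (xs.length : Int) 2 == 0) then
    PySem.List.pyGetD xs x 0   -- summ = xs[x]; total form: this branch is unreachable (x ≤ len//2, x ≠ 0)
  else summ

-- loop over the remaining range values x ∈ range(0, int(len(xs)/2)+1)
def is_centered_go (xs : List Int) (n : Int) : List Int → Bool
  | [] => false
  | x :: rest =>
    if is_centered_summ xs x == n then true else is_centered_go xs n rest

-- int(len(xs)/2) equals len(xs) // 2 for every nonnegative length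
def is_centered (xs : List Int) (n : Int) : Bool :=
  is_centered_go xs n (PySem.List.pyRange 0 (PySem.Int.floordiv (xs.length : Int) 2 + 1) 1)

-- ===== PORT B =====
-- loop over the remaining range values x ∈ range(len(xs) // 2), carrying the running sum s
def is_centered_alt_go (xs : List Int) (n : Int) (s : Int) : List Int → Bool
  | [] => s == n                          -- return s == n
  | x :: rest =>
    if s == n then true                   -- if s == n: return True
    else                                  -- s -= xs[x] + xs[-1 - x]  (both indices in range for x < len//2)
      is_centered_alt_go xs n (s - (PySem.List.pyGetD xs x 0 + PySem.List.pyGetD xs (-1 - x) 0)) rest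

def is_centered_alt (xs : List Int) (n : Int) : Bool :=
  is_centered_alt_go xs n xs.sum (PySem.List.pyRange 0 (PySem.Int.floordiv (xs.length : Int) 2) 1)

-- ===== PRECONDITION & SPEC =====
def Spec_is_centered (xs : List Int) (n : Int) (out : Bool) : Prop := out = is_centered_alt xs n
instance (xs : List Int) (n : Int) (out : Bool) : Decidable (Spec_is_centered xs n out) := by unfold Spec_is_centered; infer_instance

-- ===== CLAIM (what is proved, stated in full; the proofs are below) =====
def Claim_equal_is_centered : Prop := ∀ (xs : List Int) (n : Int), Dom_is_centered xs n → Spec_is_centered xs n (is_centered xs n)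

-- ===== LEMMAS AND PROOFS =====

-- The centered window sum sum(xs[k:len-k]), written through prefix sums.
def pvW (xs : List Int) (k : Nat) : Int := (xs.take (xs.length - k)).sum - (xs.take k).sum

lemma pvW_zero (xs : List Int) : pvW xs 0 = xs.sum := by
  simp [pvW]

lemma sum_take_succ (xs : List Int) (j : Nat) (h : j < xs.length) :
    (xs.take (j + 1)).sum = (xs.take j).sum + xs.getD j 0 := by
  rw [List.take_add_one, List.sum_append]
  simp [List.getElem?_eq_getElem h]

lemma slice_window (xs : List Int) (k : Nat) (hk : 0 < k) (h2 : 2 * k ≤ xs.length) :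
    (PySem.List.slice xs (some (k : Int)) (some (-(k : Int)))).sum = pvW xs k := by
  have hmin : min k xs.length = k := by omega
  simp only [PySem.List.slice, hk, PySem.List.clampIdx_neg_natCast, Nat.cast_nonneg,
    PySem.List.clampIdx_of_nonneg, Int.toNat_natCast, hmin, pvW]
  have hsplit : xs.take (xs.length - k) = xs.take k ++ (xs.drop k).take (xs.length - k - k) := by
    rw [show xs.length - k = k + (xs.length - k - k) from by omega, List.take_add]
    congr 2
    omega
  rw [hsplit, List.sum_append]; ring

-- A's summ for x = k (k ≤ len//2) is the centered window sum
lemma summ_eq (xs : List Int) (k : Nat) (hk : k ≤ xs.length / 2) :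
    is_centered_summ xs (k : Int) = pvW xs k := by
  unfold is_centered_summ
  by_cases hk0 : k = 0
  · simp [hk0, pvW_zero]
  · have hne : ((k : Int) == 0) = false := by simp; exact_mod_cast hk0
    have hnel : ((k : Int) == (xs.length : Int)) = false := by
      simp only [beq_eq_false_iff_ne, Ne, Nat.cast_inj]; omega
    rw [hne, hnel]
    simp [slice_window xs k (by omega) (by omega)]

lemma pvW_succ (xs : List Int) (k : Nat) (h : 2 * (k + 1) ≤ xs.length) :
    pvW xs (k + 1) = pvW xs k - (xs.getD k 0 + xs.getD (xs.length - 1 - k) 0) := by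
  have e1 := sum_take_succ xs k (by omega)
  have e2 : (xs.take (xs.length - k)).sum
      = (xs.take (xs.length - 1 - k)).sum + xs.getD (xs.length - 1 - k) 0 := by
    rw [show xs.length - k = (xs.length - 1 - k) + 1 from by omega]
    exact sum_take_succ xs _ (by omega)
  unfold pvW
  rw [show xs.length - (k + 1) = xs.length - 1 - k from by omega, e1, e2]
  ring

-- both loops, started at step k with B carrying pvW xs k, agree
lemma go_eq (xs : List Int) (n : Int) (d k : Nat) (hk : k + d = xs.length / 2) :
    is_centered_go xs n (PySem.List.pyRange (k : Int) (((xs.length / 2 : Nat) : Int) + 1) 1)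
      = is_centered_alt_go xs n (pvW xs k) (PySem.List.pyRange (k : Int) ((xs.length / 2 : Nat) : Int) 1) := by
  induction d generalizing k with
  | zero =>
    have hk' : (k : Int) = ((xs.length / 2 : Nat) : Int) := by exact_mod_cast congrArg Nat.cast (by omega : k = xs.length / 2)
    rw [hk', PySem.List.pyRange_one_singleton, PySem.List.pyRange_one_eq_nil (le_refl _)]
    simp only [is_centered_go, is_centered_alt_go, ← hk', summ_eq xs k (by omega)]
    by_cases hn : pvW xs k = n <;> simp [hn]
  | succ d ih =>
    have h1 : (k : Int) < ((xs.length / 2 : Nat) : Int) + 1 := by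
      have : (k : Int) ≤ ((xs.length / 2 : Nat) : Int) := by exact_mod_cast by omega
      omega
    have h2 : (k : Int) < ((xs.length / 2 : Nat) : Int) := by exact_mod_cast by omega
    rw [PySem.List.pyRange_one_cons h1, PySem.List.pyRange_one_cons h2]
    simp only [is_centered_go, is_centered_alt_go, summ_eq xs k (by omega)]
    by_cases hn : pvW xs k = n
    · simp [hn]
    · have hbeq : (pvW xs k == n) = false := by simpa using hn
      rw [hbeq]
      simp only [Bool.false_eq_true, if_false]
      have hg1 : PySem.List.pyGetD xs (k : Int) 0 = xs.getD k 0 := by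
        simp [PySem.List.pyGetD_natCast]
      have hg2 : PySem.List.pyGetD xs (-1 - (k : Int)) 0 = xs.getD (xs.length - 1 - k) 0 := by
        rw [show -1 - (k : Int) = -(((k + 1 : Nat)) : Int) from by push_cast; ring,
          PySem.List.pyGetD_neg_natCast xs (k + 1) 0 (by omega) (by omega),
          List.getD_eq_getElem _ _ (by omega)]
        congr 1; omega
      rw [hg1, hg2, ← pvW_succ xs k (by omega),
        show (k : Int) + 1 = ((k + 1 : Nat) : Int) from by push_cast; ring]
      exact ih (k + 1) (by omega)

lemma floordiv_len (xs : List Int) :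
    PySem.Int.floordiv (xs.length : Int) 2 = ((xs.length / 2 : Nat) : Int) := by
  exact_mod_cast PySem.Int.floordiv_natCast xs.length 2

-- ===== VERDICT (by name: the statement is the Claim_ definition above) =====
theorem is_centered_spec : Claim_equal_is_centered := by
  intro xs n _
  unfold Spec_is_centered is_centered is_centered_alt
  rw [floordiv_len, ← pvW_zero xs]
  exact go_eq xs n (xs.length / 2) 0 (by omega)
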